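-- pv_equiv track=rewrite | github.com/straygizmo/cefr-j_to_json | main.py | get_american_british_variants
-- ===== SOURCE A (Python) =====
-- from typing import Dict, List, Set, Tuple
--
-- AMERICAN_BRITISH_VARIANTS = {
--     'color': 'colour',
--     'analyze': 'analyse',
--     'realize': 'realise',
--     'organize': 'organise',
--     'recognize': 'recognise',
--     'apologize': 'apologise',
--     'emphasize': 'emphasise',
--     'criticize': 'criticise',
--     'memorize': 'memorise',
--     'minimize': 'minimise',
--     'maximize': 'maximise',
--     'optimize': 'optimise',
--     'utilize': 'utilise',
--     'center': 'centre',
--     'meter': 'metre',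
--     'theater': 'theatre',
--     'fiber': 'fibre',
--     'neighbor': 'neighbour',
--     'favor': 'favour',
--     'labor': 'labour',
--     'honor': 'honour',
--     'humor': 'humour',
--     'behavior': 'behaviour',
--     'flavor': 'flavour',
--     'endeavor': 'endeavour',
--     'defense': 'defence',
--     'offense': 'offence',
--     'license': 'licence',
--     'practice': 'practise',
--     'traveled': 'travelled',
--     'traveling': 'travelling',
--     'traveler': 'traveller',
--     'canceled': 'cancelled',
--     'canceling': 'cancelling',
--     'modeled': 'modelled',
--     'modeling': 'modelling',
--     'fueled': 'fuelled',
--     'fueling': 'fuelling',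
--     'labeled': 'labelled',
--     'labeling': 'labelling'
-- }
--
-- def get_american_british_variants(word: str) -> Tuple[List[str], List[str]]:
--     """Get American and British spelling variants."""
--     american = []
--     british = []
--
--     if word in AMERICAN_BRITISH_VARIANTS:
--         american.append(word)
--         british.append(AMERICAN_BRITISH_VARIANTS[word])
--     elif word in AMERICAN_BRITISH_VARIANTS.values():
--         british.append(word)
--         for am, br in AMERICAN_BRITISH_VARIANTS.items():
--             if br == word:
--                 american.append(am)
--                 break
--
--     for suffix in ['s', 'ed', 'ing', 'er', 'est', 'ly', 'ness', 'ment', 'tion', 'sion']: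
--         if word.endswith(suffix):
--             base = word[:-len(suffix)]
--             if base in AMERICAN_BRITISH_VARIANTS:
--                 american.append(word)
--                 british.append(AMERICAN_BRITISH_VARIANTS[base] + suffix)
--             elif base in AMERICAN_BRITISH_VARIANTS.values():
--                 british.append(word)
--                 for am, br in AMERICAN_BRITISH_VARIANTS.items():
--                     if br == base:
--                         american.append(am + suffix)
--                         break
--
--     return american, british
-- ===== SOURCE B (Python) =====
-- AMERICAN_BRITISH_VARIANTS = {
--     'color': 'colour',
--     'analyze': 'analyse',
--     'realize': 'realise',
--     'organize': 'organise',
--     'recognize': 'recognise',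
--     'apologize': 'apologise',
--     'emphasize': 'emphasise',
--     'criticize': 'criticise',
--     'memorize': 'memorise',
--     'minimize': 'minimise',
--     'maximize': 'maximise',
--     'optimize': 'optimise',
--     'utilize': 'utilise',
--     'center': 'centre',
--     'meter': 'metre',
--     'theater': 'theatre',
--     'fiber': 'fibre',
--     'neighbor': 'neighbour',
--     'favor': 'favour',
--     'labor': 'labour',
--     'honor': 'honour',
--     'humor': 'humour',
--     'behavior': 'behaviour',
--     'flavor': 'flavour',
--     'endeavor': 'endeavour',
--     'defense': 'defence',
--     'offense': 'offence',
--     'license': 'licence',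
--     'practice': 'practise',
--     'traveled': 'travelled',
--     'traveling': 'travelling',
--     'traveler': 'traveller',
--     'canceled': 'cancelled',
--     'canceling': 'cancelling',
--     'modeled': 'modelled',
--     'modeling': 'modelling',
--     'fueled': 'fuelled',
--     'fueling': 'fuelling',
--     'labeled': 'labelled',
--     'labeling': 'labelling'
-- }
--
-- # A different algorithm: instead of stripping suffixes from the query word at call time,
-- # enumerate ALL derivable words once (every american/british form plus every suffix) into
-- # a lookup table word -> (american variants, british variants); each call is one lookup.
-- _SUFFIXES = ['', 's', 'ed', 'ing', 'er', 'est', 'ly', 'ness', 'ment', 'tion', 'sion']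
--
-- _TABLE = {}
-- for _s in _SUFFIXES:
--     for _am, _br in AMERICAN_BRITISH_VARIANTS.items():
--         for _w in (_am + _s, _br + _s):
--             _entry = _TABLE.setdefault(_w, ([], []))
--             _entry[0].append(_am + _s)
--             _entry[1].append(_br + _s)
--
-- def get_american_british_variants(word):
--     """Get American and British spelling variants."""
--     american, british = _TABLE.get(word, ([], []))
--     return list(american), list(british)
-- ===== Notes on version B (the rewrite author's own statement) =====
-- stated objective: alternative
-- what changed: B enumerates once, at module load, every derivable word (each American and British form concatenated with each suffix, empty suffix included) into a table word -> (american list, british list); each call is then a single dict lookup instead of A's suffix-stripping with key/value membership tests and items() scans.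
import Mathlib
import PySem

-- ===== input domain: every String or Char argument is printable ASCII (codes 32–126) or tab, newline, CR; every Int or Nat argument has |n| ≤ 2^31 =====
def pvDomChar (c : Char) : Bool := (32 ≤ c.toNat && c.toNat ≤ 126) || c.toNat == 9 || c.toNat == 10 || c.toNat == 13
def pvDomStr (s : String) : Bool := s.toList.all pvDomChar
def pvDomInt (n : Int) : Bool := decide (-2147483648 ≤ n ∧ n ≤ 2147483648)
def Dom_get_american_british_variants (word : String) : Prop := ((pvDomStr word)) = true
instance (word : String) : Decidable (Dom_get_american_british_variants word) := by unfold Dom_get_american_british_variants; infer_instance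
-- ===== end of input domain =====

-- B replaces A's call-time suffix stripping (with dict membership tests and items() scans)
-- by a table, built once, of EVERY derivable word (each American/British form plus each
-- suffix) mapped to its variant lists; each call is one dict lookup (objective: alternative).

-- module-level constant AMERICAN_BRITISH_VARIANTS (shared context of A and B)
def pvVariants : List (String × String) :=
  [("color", "colour"), ("analyze", "analyse"), ("realize", "realise"),
   ("organize", "organise"), ("recognize", "recognise"), ("apologize", "apologise"),
   ("emphasize", "emphasise"), ("criticize", "criticise"), ("memorize", "memorise"),
   ("minimize", "minimise"), ("maximize", "maximise"), ("optimize", "optimise"),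
   ("utilize", "utilise"), ("center", "centre"), ("meter", "metre"),
   ("theater", "theatre"), ("fiber", "fibre"), ("neighbor", "neighbour"),
   ("favor", "favour"), ("labor", "labour"), ("honor", "honour"),
   ("humor", "humour"), ("behavior", "behaviour"), ("flavor", "flavour"),
   ("endeavor", "endeavour"), ("defense", "defence"), ("offense", "offence"),
   ("license", "licence"), ("practice", "practise"), ("traveled", "travelled"),
   ("traveling", "travelling"), ("traveler", "traveller"), ("canceled", "cancelled"),
   ("canceling", "cancelling"), ("modeled", "modelled"), ("modeling", "modelling"),
   ("fueled", "fuelled"), ("fueling", "fuelling"), ("labeled", "labelled"),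
   ("labeling", "labelling")]

def pvDict : PySem.Dict String String := PySem.Dict.ofList pvVariants

-- ===== PORT A =====
def pvSuffixesA : List String :=
  ["s", "ed", "ing", "er", "est", "ly", "ness", "ment", "tion", "sion"]

-- 'for am, br in AMERICAN_BRITISH_VARIANTS.items(): if br == word/base: american.append(am); break'
def pvScanAm (base : String) : List String :=
  match pvDict.items.find? (fun p => p.2 == base) with
  | some p => [p.1]
  | none => []

def pvStepA (word : String) (acc : List String × List String) (suffix : String) :
    List String × List String :=
  if PySem.Str.endswith word suffix then
    let base := PySem.Str.slice word none (some (-(PySem.Str.len suffix)))  -- word[:-len(suffix)]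
    if pvDict.contains base then
      (acc.1 ++ [word], acc.2 ++ [(pvDict.get? base).getD "" ++ suffix])
    else if (pvDict.values).contains base then
      (acc.1 ++ (pvScanAm base).map (fun am => am ++ suffix), acc.2 ++ [word])
    else acc
  else acc

def get_american_british_variants (word : String) : List String × List String :=
  let init : List String × List String :=
    if pvDict.contains word then ([word], [(pvDict.get? word).getD ""])
    else if (pvDict.values).contains word then (pvScanAm word, [word])
    else ([], [])
  pvSuffixesA.foldl (pvStepA word) init

-- ===== PORT B =====
def pvSuffixesB : List String :=
  ["", "s", "ed", "ing", "er", "est", "ly", "ness", "ment", "tion", "sion"]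

-- '_entry = _TABLE.setdefault(_w, ([], [])); _entry[0].append(_am+_s); _entry[1].append(_br+_s)'
def pvAddEntry (t : PySem.Dict String (List String × List String)) (w am br : String) :
    PySem.Dict String (List String × List String) :=
  let e := t.getD w ([], [])
  t.insert w (e.1 ++ [am], e.2 ++ [br])

-- the module-level _TABLE built by the three nested 'for' loops of Source B
def pvTable : PySem.Dict String (List String × List String) :=
  pvSuffixesB.foldl (fun t s =>
    pvDict.items.foldl (fun t p =>
      [p.1 ++ s, p.2 ++ s].foldl (fun t w => pvAddEntry t w (p.1 ++ s) (p.2 ++ s)) t) t)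
    PySem.Dict.empty

def get_american_british_variants_alt (word : String) : List String × List String :=
  -- 'return list(american), list(british)': the list() copies are identity on immutable Lean lists
  pvTable.getD word ([], [])

-- ===== PRECONDITION & SPEC =====
def Spec_get_american_british_variants (word : String) (out : List String × List String) : Prop := out = get_american_british_variants_alt word
instance (word : String) (out : List String × List String) : Decidable (Spec_get_american_british_variants word out) := by unfold Spec_get_american_british_variants; infer_instance

-- ===== CLAIM =====
def Claim_equal_get_american_british_variants : Prop := ∀ (word : String), Dom_get_american_british_variants word → Spec_get_american_british_variants word (get_american_british_variants word)

-- ===== LEMMAS AND PROOFS =====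

-- componentwise append on pairs of lists, and its iterated form
def pvApp (x y : List String × List String) : List String × List String :=
  (x.1 ++ y.1, x.2 ++ y.2)

def pvConcat (L : List (List String × List String)) : List String × List String :=
  L.foldr pvApp ([], [])

-- A's per-suffix contribution, phrased over the pair list
def pvContrib (word s : String) : List String × List String :=
  if PySem.Str.endswith word s then
    let base := PySem.Str.slice word none (some (PySem.Str.len word - PySem.Str.len s))
    match pvVariants.find? (fun p => p.1 == base) with
    | some p => ([word], [p.2 ++ s])
    | none =>
      match pvVariants.find? (fun p => p.2 == base) with
      | some p => ([p.1 ++ s], [word])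
      | none => ([], [])
  else ([], [])

theorem pvApp_assoc (a b c : List String × List String) :
    pvApp (pvApp a b) c = pvApp a (pvApp b c) := by
  simp [pvApp]

theorem pvApp_nil (a : List String × List String) : pvApp a ([], []) = a := by
  simp [pvApp]

theorem pvConcat_append (L1 L2 : List (List String × List String)) :
    pvConcat (L1 ++ L2) = pvApp (pvConcat L1) (pvConcat L2) := by
  induction L1 with
  | nil => simp [pvConcat, pvApp]
  | cons x xs ih => simp [pvConcat, List.foldr_cons] at *; rw [ih, pvApp_assoc]

theorem pv_foldl_app (f : String → List String × List String) (l : List String)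
    (init : List String × List String) :
    l.foldl (fun acc s => pvApp acc (f s)) init = pvApp init (pvConcat (l.map f)) := by
  induction l generalizing init with
  | nil => simp [pvConcat, pvApp_nil]
  | cons x xs ih => simp only [List.foldl_cons, List.map_cons, ih, pvConcat, List.foldr_cons]
                    rw [pvApp_assoc]

set_option maxRecDepth 10000 in
theorem pv_items : pvDict.items = pvVariants := by decide

set_option maxRecDepth 10000 in
theorem pv_keys_nodup : (pvVariants.map Prod.fst).Nodup := by decide

set_option maxRecDepth 10000 in
theorem pv_vals_nodup : (pvVariants.map Prod.snd).Nodup := by decide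

set_option maxRecDepth 20000 in
theorem pv_disj : ∀ p ∈ pvVariants, ∀ q ∈ pvVariants, p.1 ≠ q.2 := by decide

-- ---- A side: A = pvConcat of per-suffix contributions ----

theorem pv_slice_eq (word suffix : String) (hk : suffix.toList.length ≠ 0)
    (h : PySem.Str.endswith word suffix = true) :
    PySem.Str.slice word none (some (PySem.Str.len word - PySem.Str.len suffix))
      = PySem.Str.slice word none (some (-(PySem.Str.len suffix))) := by
  have hs : suffix.toList <:+ word.toList := by
    have h' := h
    simp only [PySem.Str.endswith_eq] at h'
    exact (PySem.Chars.endswith_iff _ _).mp h'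
  have hle : suffix.toList.length ≤ word.toList.length := hs.length_le
  unfold PySem.Str.slice
  congr 1
  simp only [PySem.Chars.slice_eq_listSlice]
  rw [show PySem.Str.len word - PySem.Str.len suffix
        = ((word.toList.length - suffix.toList.length : Nat) : Int) by
      simp only [PySem.Str.len]; omega]
  rw [show PySem.Str.len suffix = (suffix.toList.length : Int) from rfl]
  rw [PySem.List.slice_to _ (Int.natCast_nonneg _),
      PySem.List.slice_to_neg_natCast _ _ (Nat.pos_of_ne_zero hk)]
  simp

theorem pv_get?_eq (b : String) :
    pvDict.get? b = (pvVariants.find? (fun p => p.1 == b)).map (fun p => p.2) := by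
  rw [show pvDict.get? b = (pvDict.items.find? (fun p => p.1 == b)).map (fun x => x.2) from rfl]
  rw [pv_items]

theorem pv_contains_eq (b : String) :
    pvDict.contains b = (pvVariants.find? (fun p => p.1 == b)).isSome := by
  rw [PySem.Dict.contains_eq_isSome_get?, pv_get?_eq]
  cases pvVariants.find? (fun p => p.1 == b) <;> rfl

theorem pv_values_contains (b : String) :
    (pvDict.values).contains b = (pvVariants.find? (fun p => p.2 == b)).isSome := by
  rw [show pvDict.values = pvDict.items.map (fun p => p.2) from rfl, pv_items]
  induction pvVariants with
  | nil => rfl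
  | cons x xs ih =>
    by_cases h : x.2 = b
    · simp [h]
    · simp only [List.map_cons, List.contains_cons, List.find?_cons,
        show (x.2 == b) = false by simpa using h,
        show (b == x.2) = false by simpa using Ne.symm h, Bool.false_or]
      exact ih

theorem pv_stepA_eq (word : String) (s : String) (hk : s.toList.length ≠ 0)
    (acc : List String × List String) :
    pvStepA word acc s = pvApp acc (pvContrib word s) := by
  unfold pvStepA pvContrib
  by_cases hew : PySem.Str.endswith word s = true
  · simp only [hew, if_true]
    rw [← pv_slice_eq word s hk hew]
    set base := PySem.Str.slice word none (some (PySem.Str.len word - PySem.Str.len s)) with hb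
    rw [pv_contains_eq, pv_get?_eq, pv_values_contains]
    rcases hf : pvVariants.find? (fun p => p.1 == base) with _ | p
    · simp only [hf, Option.isSome_none, Bool.false_eq_true, if_false]
      rcases hg : pvVariants.find? (fun p => p.2 == base) with _ | p
      · simp [hg, pvApp]
      · simp only [hg, Option.isSome_some, if_true]
        rw [show pvScanAm base = [p.1] by unfold pvScanAm; rw [pv_items, hg]]
        simp [pvApp]
    · simp [hf, pvApp]
  · have hew' : PySem.Chars.endswith word.toList s.toList = false := by
      simpa [PySem.Str.endswith_eq] using hew
    simp [hew', pvApp_nil]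

theorem pv_endswith_empty (word : String) : PySem.Str.endswith word "" = true := by
  simp only [PySem.Str.endswith_eq]
  exact (PySem.Chars.endswith_iff _ _).mpr (by simp)

theorem pv_slice_whole (word : String) :
    PySem.Str.slice word none (some (PySem.Str.len word - PySem.Str.len "")) = word := by
  unfold PySem.Str.slice
  have : PySem.Str.len word - PySem.Str.len "" = ((word.toList.length : Nat) : Int) := by
    simp [PySem.Str.len]
  rw [this]
  simp only [PySem.Chars.slice_eq_listSlice]
  rw [PySem.List.slice_to _ (Int.natCast_nonneg _),
    show ((word.toList.length : Int)).toNat = word.toList.length from Int.toNat_natCast _,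
    List.take_length, String.ofList_toList]

theorem pv_init_eq (word : String) :
    (if pvDict.contains word then ([word], [(pvDict.get? word).getD ""])
     else if (pvDict.values).contains word then (pvScanAm word, [word])
     else (([], []) : List String × List String)) = pvContrib word "" := by
  unfold pvContrib
  rw [pv_endswith_empty, if_pos rfl, pv_slice_whole,
      pv_contains_eq, pv_get?_eq, pv_values_contains]
  rcases hf : pvVariants.find? (fun p => p.1 == word) with _ | p
  · simp only [hf, Option.isSome_none, Bool.false_eq_true, if_false]
    rcases hg : pvVariants.find? (fun p => p.2 == word) with _ | p
    · simp [hg]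
    · simp only [hg, Option.isSome_some, if_true]
      rw [show pvScanAm word = [p.1] by unfold pvScanAm; rw [pv_items, hg]]
      simp
  · simp [hf]

theorem pv_A_eq (word : String) :
    get_american_british_variants word = pvConcat (pvSuffixesB.map (pvContrib word)) := by
  unfold get_american_british_variants
  rw [pv_init_eq]
  rw [show pvSuffixesA.foldl (pvStepA word) (pvContrib word "")
        = pvSuffixesA.foldl (fun acc s => pvApp acc (pvContrib word s)) (pvContrib word "") from
    PySem.List.foldl_congr_mem pvSuffixesA (pvStepA word) _ _
      (fun acc x hx => pv_stepA_eq word x (by fin_cases hx <;> decide) acc)]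
  rw [pv_foldl_app]
  rw [show pvSuffixesB = "" :: pvSuffixesA from rfl, List.map_cons]
  rfl

-- ---- B side: table lookup = pvConcat of per-suffix contributions ----

-- what a flattened build list contributes to the entry of w
def pvMatches (w : String) (L : List (String × String × String)) :
    List String × List String :=
  pvConcat ((L.filter (fun e => e.1 == w)).map (fun e => ([e.2.1], [e.2.2])))

theorem pvMatches_append (w : String) (L1 L2 : List (String × String × String)) :
    pvMatches w (L1 ++ L2) = pvApp (pvMatches w L1) (pvMatches w L2) := by
  unfold pvMatches
  rw [List.filter_append, List.map_append, pvConcat_append]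

theorem pv_getD_build (L : List (String × String × String))
    (t : PySem.Dict String (List String × List String)) (w : String) :
    (L.foldl (fun t e => pvAddEntry t e.1 e.2.1 e.2.2) t).getD w ([], [])
      = pvApp (t.getD w ([], [])) (pvMatches w L) := by
  induction L generalizing t with
  | nil => simp [pvMatches, pvConcat, pvApp_nil]
  | cons e L ih =>
    rw [List.foldl_cons, ih]
    by_cases h : w = e.1
    · subst h
      rw [show (pvAddEntry t e.1 e.2.1 e.2.2).getD e.1 ([], [])
            = pvApp (t.getD e.1 ([], [])) ([e.2.1], [e.2.2]) by
          unfold pvAddEntry; rw [PySem.Dict.getD_insert]; simp [pvApp]]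
      rw [pvApp_assoc]
      congr 1
      unfold pvMatches
      simp [pvConcat]
    · rw [show (pvAddEntry t e.1 e.2.1 e.2.2).getD w ([], []) = t.getD w ([], []) by
          unfold pvAddEntry; rw [PySem.Dict.getD_insert, if_neg h]]
      congr 1
      unfold pvMatches
      rw [List.filter_cons, if_neg (by simpa using Ne.symm h)]

-- per-pair flat entries for one suffix
def pvEnt (s : String) (p : String × String) : List (String × String × String) :=
  [(p.1 ++ s, p.1 ++ s, p.2 ++ s), (p.2 ++ s, p.1 ++ s, p.2 ++ s)]

theorem pv_table_flat (w : String) :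
    pvTable.getD w ([], [])
      = pvMatches w (pvSuffixesB.flatMap (fun s => pvVariants.flatMap (pvEnt s))) := by
  have : pvTable = (pvSuffixesB.flatMap (fun s => pvVariants.flatMap (pvEnt s))).foldl
      (fun t e => pvAddEntry t e.1 e.2.1 e.2.2) PySem.Dict.empty := by
    unfold pvTable
    rw [List.foldl_flatMap]
    refine congrArg (fun f => List.foldl f PySem.Dict.empty pvSuffixesB) ?_
    funext t s
    rw [pv_items, List.foldl_flatMap]
    refine congrArg (fun f => List.foldl f t pvVariants) ?_
    funext t' p
    simp [pvEnt]
  rw [this, pv_getD_build]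
  simp [pvApp, PySem.Dict.empty, PySem.Dict.getD, PySem.Dict.get?]

theorem pvMatches_flatMap {α : Type} (w : String) (F : α → List (String × String × String))
    (l : List α) :
    pvMatches w (l.flatMap F) = pvConcat (l.map (fun a => pvMatches w (F a))) := by
  induction l with
  | nil => simp [pvMatches, pvConcat]
  | cons a l ih =>
    rw [List.flatMap_cons, pvMatches_append, ih, List.map_cons]
    rfl

-- the combinatorial core: for one suffix, the matched entries are exactly A's contribution
theorem pv_core_none (word s : String) (l : List (String × String))
    (hno : ∀ x : String, x ++ s ≠ word) :
    pvConcat (l.map (fun p => pvMatches word (pvEnt s p))) = ([], []) := by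
  induction l with
  | nil => rfl
  | cons p l ih =>
    rw [List.map_cons, show pvConcat (_ :: _) = pvApp (pvMatches word (pvEnt s p))
          (pvConcat (l.map (fun p => pvMatches word (pvEnt s p)))) from rfl, ih]
    rw [show pvMatches word (pvEnt s p) = ([], []) by
      unfold pvMatches pvEnt
      rw [List.filter_cons, if_neg (by simpa using hno p.1),
          List.filter_cons, if_neg (by simpa using hno p.2)]
      rfl]
    rfl

theorem pv_core (word s base : String) (l : List (String × String))
    (hk : (l.map Prod.fst).Nodup) (hv : (l.map Prod.snd).Nodup)
    (hd : ∀ p ∈ l, ∀ q ∈ l, p.1 ≠ q.2)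
    (hbw : ∀ x : String, x ++ s = word ↔ x = base) :
    pvConcat (l.map (fun p => pvMatches word (pvEnt s p)))
      = (match l.find? (fun p => p.1 == base) with
         | some p => ([word], [p.2 ++ s])
         | none =>
           match l.find? (fun p => p.2 == base) with
           | some p => ([p.1 ++ s], [word])
           | none => ([], [])) := by
  induction l with
  | nil => rfl
  | cons q l ih =>
    have hk' : (l.map Prod.fst).Nodup := by simpa using (List.nodup_cons.mp (by simpa using hk)).2
    have hv' : (l.map Prod.snd).Nodup := by simpa using (List.nodup_cons.mp (by simpa using hv)).2
    have hd' : ∀ p ∈ l, ∀ r ∈ l, p.1 ≠ r.2 := fun p hp r hr =>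
      hd p (List.mem_cons_of_mem _ hp) r (List.mem_cons_of_mem _ hr)
    rw [List.map_cons, show pvConcat (_ :: _) = pvApp (pvMatches word (pvEnt s q))
          (pvConcat (l.map (fun p => pvMatches word (pvEnt s p)))) from rfl,
        ih hk' hv' hd']
    have hm : ∀ x : String, (x ++ s == word) = decide (x = base) := by
      intro x
      by_cases hx : x = base
      · subst hx
        simp [(hbw x).mpr rfl]
      · simp [hx, show x ++ s ≠ word from fun h => hx ((hbw x).mp h)]
    by_cases h1 : q.1 = base
    · -- head key matches: no other key equals base, and no value at all equals base
      have hnok : ∀ p ∈ l, p.1 ≠ base := by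
        intro p hp hpe
        have : (base :: l.map Prod.fst).Nodup := by
          simpa [h1] using hk
        exact (List.nodup_cons.mp this).1 (by
          exact List.mem_map.mpr ⟨p, hp, hpe⟩)
      have hnov : ∀ p ∈ q :: l, p.2 ≠ base := by
        intro p hp hpe
        exact hd q (List.mem_cons_self) p hp (by rw [h1, hpe])
      have e1 : (q.1 == base) = true := by simpa using h1
      simp only [List.find?_cons, e1]
      rw [show l.find? (fun p => p.1 == base) = none from
        List.find?_eq_none.mpr (fun p hp => by simpa using hnok p hp)]
      rw [show l.find? (fun p => p.2 == base) = none from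
        List.find?_eq_none.mpr (fun p hp => by
          simpa using hnov p (List.mem_cons_of_mem _ hp))]
      rw [show pvMatches word (pvEnt s q) = ([q.1 ++ s], [q.2 ++ s]) by
        unfold pvMatches pvEnt
        rw [List.filter_cons, if_pos (by rw [hm]; simpa using h1),
            List.filter_cons, if_neg (by
              rw [hm]; simpa using hnov q List.mem_cons_self)]
        rfl]
      rw [show q.1 ++ s = word from (hbw q.1).mpr h1]
      simp [pvApp]
    · by_cases h2 : q.2 = base
      · -- head value matches: no key anywhere equals base, no other value equals base
        have hnok : ∀ p ∈ q :: l, p.1 ≠ base := by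
          intro p hp hpe
          exact hd p hp q List.mem_cons_self (by rw [hpe, h2])
        have hnov : ∀ p ∈ l, p.2 ≠ base := by
          intro p hp hpe
          have : (base :: l.map Prod.snd).Nodup := by simpa [h2] using hv
          exact (List.nodup_cons.mp this).1 (List.mem_map.mpr ⟨p, hp, hpe⟩)
        have e1 : (q.1 == base) = false := by simpa using hnok q List.mem_cons_self
        have e2 : (q.2 == base) = true := by simpa using h2
        simp only [List.find?_cons, e1, e2]
        rw [show l.find? (fun p : String × String => p.1 == base) = none from
          List.find?_eq_none.mpr (fun p hp => by
            simpa using hnok p (List.mem_cons_of_mem _ hp))]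
        rw [show l.find? (fun p : String × String => p.2 == base) = none from
          List.find?_eq_none.mpr (fun p hp => by simpa using hnov p hp)]
        rw [show pvMatches word (pvEnt s q) = ([q.1 ++ s], [q.2 ++ s]) by
          unfold pvMatches pvEnt
          rw [List.filter_cons, if_neg (by rw [hm]; simpa using h1),
              List.filter_cons, if_pos (by rw [hm]; simpa using h2)]
          rfl]
        rw [show q.2 ++ s = word from (hbw q.2).mpr h2]
        simp [pvApp, pvConcat]
      · -- head matches nothing
        rw [show pvMatches word (pvEnt s q) = ([], []) by
          unfold pvMatches pvEnt
          rw [List.filter_cons, if_neg (by rw [hm]; simpa using h1),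
              List.filter_cons, if_neg (by rw [hm]; simpa using h2)]
          rfl]
        have e1 : (q.1 == base) = false := by simpa using h1
        have e2 : (q.2 == base) = false := by simpa using h2
        simp only [List.find?_cons, e1, e2]
        rcases hf : l.find? (fun p : String × String => p.1 == base) with _ | p
        · rcases hg : l.find? (fun p : String × String => p.2 == base) with _ | p
          · simp [pvApp]
          · simp [pvApp]
        · simp [pvApp]

theorem pv_base_iff (word s : String) (hew : PySem.Str.endswith word s = true) :
    ∀ x : String, x ++ s = word
      ↔ x = PySem.Str.slice word none (some (PySem.Str.len word - PySem.Str.len s)) := by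
  have hs : s.toList <:+ word.toList := by
    have h' := hew
    simp only [PySem.Str.endswith_eq] at h'
    exact (PySem.Chars.endswith_iff _ _).mp h'
  obtain ⟨pre, hpre⟩ := hs
  have hbase : (PySem.Str.slice word none
      (some (PySem.Str.len word - PySem.Str.len s))).toList = pre := by
    unfold PySem.Str.slice
    simp only [PySem.Chars.slice_eq_listSlice]
    rw [show PySem.Str.len word - PySem.Str.len s = ((pre.length : Nat) : Int) by
      simp only [PySem.Str.len]
      rw [← hpre]
      simp]
    rw [PySem.List.slice_to _ (Int.natCast_nonneg _), Int.toNat_natCast, ← hpre,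
        List.take_left]
    exact String.toList_ofList
  intro x
  constructor
  · intro h
    rw [← String.toList_inj, hbase]
    have : x.toList ++ s.toList = pre ++ s.toList := by
      rw [← String.toList_append, h, ← hpre]
    exact List.append_cancel_right this
  · intro h
    rw [← String.toList_inj, String.toList_append, h, hbase, hpre]

theorem pv_no_base (word s : String) (hew : ¬ PySem.Str.endswith word s = true) :
    ∀ x : String, x ++ s ≠ word := by
  intro x h
  apply hew
  simp only [PySem.Str.endswith_eq]
  apply (PySem.Chars.endswith_iff _ _).mpr
  rw [← h, String.toList_append]
  exact List.suffix_append _ _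

theorem pv_persuffix (word s : String) :
    pvMatches word (pvVariants.flatMap (pvEnt s)) = pvContrib word s := by
  rw [pvMatches_flatMap]
  unfold pvContrib
  by_cases hew : PySem.Str.endswith word s = true
  · rw [if_pos hew]
    exact pv_core word s _ pvVariants pv_keys_nodup pv_vals_nodup pv_disj
      (pv_base_iff word s hew)
  · rw [if_neg hew]
    exact pv_core_none word s pvVariants (pv_no_base word s hew)

set_option maxRecDepth 10000 in
theorem pv_B_eq (word : String) :
    get_american_british_variants_alt word = pvConcat (pvSuffixesB.map (pvContrib word)) := by
  unfold get_american_british_variants_alt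
  rw [pv_table_flat, pvMatches_flatMap]
  congr 1
  exact List.map_congr_left (fun s _ => pv_persuffix word s)

-- ===== VERDICT =====
theorem get_american_british_variants_spec : Claim_equal_get_american_british_variants := by
  intro word _
  show _ = get_american_british_variants_alt word
  rw [pv_A_eq, pv_B_eq]
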